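-- pv_equiv track=rewrite | github.com/anatolegosset/Project_Euler | src/project_euler/lib/various_funcs.py | generate_divisors_under
-- ===== SOURCE A (Python) =====
-- def generate_divisors_under(n, include_self=True, include_1=True, to_sort=True):
--     result = [[] for _ in range(n + 1)]
--     min_i = 1
--     min_j = 1
--     if not include_1:
--         min_i += 1
--     if not include_self:
--         min_j += 1
--
--     for i in range(min_i, n + 1):
--         product = i * min_j
--         while product <= n:
--             result[product].append(i)
--             product += i
--
--     if to_sort:
--         return [sorted(divisors) for divisors in result]
--     return result
-- ===== SOURCE B (Python) =====
-- def generate_divisors_under(n, include_self=True, include_1=True, to_sort=True):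
--     # Per-number divisor-pair scan up to sqrt(m) instead of A's multiple-stamping
--     # sieve; each list comes out already ascending, so no sorting step is needed.
--     min_d = 1 if include_1 else 2
--     min_q = 1 if include_self else 2
--     result = []
--     for m in range(n + 1):
--         small = []
--         large = []
--         d = 1
--         while d * d <= m:
--             if m % d == 0:
--                 q = m // d
--                 if d >= min_d and q >= min_q:
--                     small.append(d)
--                 if q != d and q >= min_d and d >= min_q:
--                     large.append(q)
--             d += 1
--         result.append(small + large[::-1])
--     return result
-- ===== Notes on version B (the rewrite author's own statement) =====
-- stated objective: alternative
-- what changed: Replaces the sieve that stamps every multiple of every candidate divisor into a mutable table with a per-number divisor-pair scan up to sqrt(m) (collecting d and its cofactor m//d), whose lists come out already ascending so no sorting step is needed.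
import Mathlib
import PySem

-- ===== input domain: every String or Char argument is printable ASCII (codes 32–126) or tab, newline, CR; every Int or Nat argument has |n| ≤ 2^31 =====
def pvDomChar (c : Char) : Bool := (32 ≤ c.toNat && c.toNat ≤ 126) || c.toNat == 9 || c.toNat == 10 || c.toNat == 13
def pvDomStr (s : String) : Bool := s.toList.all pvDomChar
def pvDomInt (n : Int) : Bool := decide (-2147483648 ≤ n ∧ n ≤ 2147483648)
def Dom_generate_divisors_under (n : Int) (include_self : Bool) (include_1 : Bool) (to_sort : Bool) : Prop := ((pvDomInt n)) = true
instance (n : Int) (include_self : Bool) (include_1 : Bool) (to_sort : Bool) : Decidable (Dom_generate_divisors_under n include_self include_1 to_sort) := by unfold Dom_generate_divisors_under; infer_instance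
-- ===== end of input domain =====

-- B replaces A's multiple-stamping sieve with a per-number divisor-pair scan up to sqrt(m) (objective: alternative algorithm).

-- ===== PORT A =====
-- the inner 'while product <= n' loop; the '1 ≤ i' conjunct is a totality guard only
-- (every call passes i ≥ min_i ≥ 1)
def sieveInner (n i product : Int) (result : List (List Int)) : List (List Int) :=
  if h : product ≤ n ∧ 1 ≤ i then
    sieveInner n i (product + i) (result.modify product.toNat (· ++ [i]))
  else result
termination_by (n + 1 - product).toNat
decreasing_by omega

def generate_divisors_under (n : Int) (include_self : Bool) (include_1 : Bool) (to_sort : Bool) : List (List Int) :=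
  let result : List (List Int) := (PySem.List.pyRange 0 (n + 1) 1).map (fun _ => [])
  let min_i : Int := if include_1 then 1 else 2
  let min_j : Int := if include_self then 1 else 2
  let result := (PySem.List.pyRange min_i (n + 1) 1).foldl
      (fun res i => sieveInner n i (i * min_j) res) result
  if to_sort then result.map (fun divisors => PySem.List.sorted divisors (fun x => x)) else result

-- ===== PORT B =====
-- the inner 'while d * d <= m' loop of Source B; '1 ≤ d' is a totality guard only
-- (every call passes d ≥ 1)
def pairScan (m min_d min_q d : Int) (small large : List Int) : List Int × List Int :=
  if h : d * d ≤ m ∧ 1 ≤ d then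
    if PySem.Int.mod m d == 0 then
      pairScan m min_d min_q (d + 1)
        (if min_d ≤ d ∧ min_q ≤ PySem.Int.floordiv m d then small ++ [d] else small)
        (if PySem.Int.floordiv m d ≠ d ∧ min_d ≤ PySem.Int.floordiv m d ∧ min_q ≤ d
         then large ++ [PySem.Int.floordiv m d] else large)
    else pairScan m min_d min_q (d + 1) small large
  else (small, large)
termination_by (m + 1 - d).toNat
decreasing_by
  all_goals (have h2 : d ≤ d * d := le_mul_of_one_le_left (by omega) (by omega); omega)

def generate_divisors_under_alt (n : Int) (include_self : Bool) (include_1 : Bool) (to_sort : Bool) : List (List Int) :=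
  let min_d : Int := if include_1 then 1 else 2
  let min_q : Int := if include_self then 1 else 2
  (PySem.List.pyRange 0 (n + 1) 1).map (fun m =>
    (pairScan m min_d min_q 1 [] []).1 ++ (pairScan m min_d min_q 1 [] []).2.reverse)

-- ===== PRECONDITION & SPEC =====
def Spec_generate_divisors_under (n : Int) (include_self : Bool) (include_1 : Bool) (to_sort : Bool) (out : List (List Int)) : Prop := out = generate_divisors_under_alt n include_self include_1 to_sort
instance (n : Int) (include_self : Bool) (include_1 : Bool) (to_sort : Bool) (out : List (List Int)) : Decidable (Spec_generate_divisors_under n include_self include_1 to_sort out) := by unfold Spec_generate_divisors_under; infer_instance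

-- ===== CLAIM (what is proved, stated in full; the proofs are below) =====
def Claim_equal_generate_divisors_under : Prop := ∀ (n : Int) (include_self : Bool) (include_1 : Bool) (to_sort : Bool), Dom_generate_divisors_under n include_self include_1 to_sort → Spec_generate_divisors_under n include_self include_1 to_sort (generate_divisors_under n include_self include_1 to_sort)

-- ===== LEMMAS AND PROOFS =====

theorem getD_modify {α : Type} (l : List α) (i j : Nat) (f : α → α) (d : α) :
    (l.modify i f).getD j d =
      if i = j ∧ j < l.length then f (l.getD j d) else l.getD j d := by
  by_cases h : j < l.length
  · rw [List.getD_eq_getElem l d h, List.getD_eq_getElem _ d (by simpa using h),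
      List.getElem_modify]
    split_ifs with h1 h2 h2 <;> simp_all
  · rw [List.getD_eq_default _ d (by rw [List.length_modify]; omega),
      List.getD_eq_default _ d (by omega), if_neg (by omega)]

theorem sieveInner_length (n i p : Int) (res : List (List Int)) :
    (sieveInner n i p res).length = res.length := by
  fun_induction sieveInner with
  | case1 p res h ih => simpa using ih
  | case2 => rfl

theorem sieveInner_getD (n i p : Int) (res : List (List Int)) (hi : 1 ≤ i) (hp : 1 ≤ p)
    (m : Nat) :
    (sieveInner n i p res).getD m [] =
      res.getD m [] ++
        (if m < res.length ∧ p ≤ (m : Int) ∧ (m : Int) ≤ n ∧ i ∣ (m : Int) - p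
         then [i] else []) := by
  fun_induction sieveInner n i p res with
  | case1 p res h ih =>
    rw [ih (by omega)]
    rw [getD_modify, List.length_modify]
    have hdvd : (i ∣ (m:Int) - (p + i)) ↔ (i ∣ (m:Int) - p) := by
      rw [show (m:Int) - (p + i) = ((m:Int) - p) - i by ring]
      exact dvd_sub_left (dvd_refl i)
    by_cases hm : p.toNat = m ∧ m < res.length
    · have hpm : (m : Int) = p := by omega
      have c1 : ¬ (m < res.length ∧ p + i ≤ (m:Int) ∧ (m:Int) ≤ n ∧ i ∣ (m:Int) - (p + i)) := by
        rintro ⟨_, h2, _, _⟩; omega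
      have c2 : (m < res.length ∧ p ≤ (m:Int) ∧ (m:Int) ≤ n ∧ i ∣ (m:Int) - p) := by
        exact ⟨hm.2, by omega, by omega, by simp [hpm]⟩
      simp [if_pos hm, if_neg c1, if_pos c2]
    · rw [if_neg hm]
      have hiff : (m < res.length ∧ p + i ≤ (m:Int) ∧ (m:Int) ≤ n ∧ i ∣ (m:Int) - (p + i)) ↔
          (m < res.length ∧ p ≤ (m:Int) ∧ (m:Int) ≤ n ∧ i ∣ (m:Int) - p) := by
        constructor
        · rintro ⟨a, b, c, d⟩; exact ⟨a, by omega, c, hdvd.mp d⟩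
        · rintro ⟨a, b, c, d⟩
          have hne : (m:Int) ≠ p := by omega
          have hgt : (0:Int) < (m:Int) - p := by omega
          have := Int.le_of_dvd hgt d
          exact ⟨a, by omega, c, hdvd.mpr d⟩
      rw [if_congr hiff rfl rfl]
  | case2 p res h =>
    have : ¬ (m < res.length ∧ p ≤ (m:Int) ∧ (m:Int) ≤ n ∧ i ∣ (m:Int) - p) := by
      rintro ⟨_, h2, h3, _⟩; omega
    simp [this]

theorem fold_length (n mj : Int) (L : List Int) (res : List (List Int)) :
    (L.foldl (fun r i => sieveInner n i (i * mj) r) res).length = res.length := by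
  induction L generalizing res with
  | nil => rfl
  | cons a L ih => rw [List.foldl_cons, ih, sieveInner_length]

theorem fold_getD (n mj : Int) (hmj : 1 ≤ mj) (L : List Int) (hL : ∀ i ∈ L, 1 ≤ i)
    (res : List (List Int)) (m : Nat) :
    (L.foldl (fun r i => sieveInner n i (i * mj) r) res).getD m [] =
      res.getD m [] ++
        (if m < res.length ∧ (m : Int) ≤ n then
          L.filter (fun i => decide (i * mj ≤ (m : Int) ∧ i ∣ (m : Int) - i * mj))
         else []) := by
  induction L generalizing res with
  | nil => simp
  | cons a L ih =>
    have ha : 1 ≤ a := hL a (by simp)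
    have hap : 1 ≤ a * mj := by
      have : 0 < a * mj := mul_pos (by omega) (by omega)
      omega
    rw [List.foldl_cons, ih (fun i hi => hL i (by simp [hi])),
      sieveInner_length, sieveInner_getD n a (a * mj) res ha hap m]
    by_cases hout : m < res.length ∧ (m : Int) ≤ n
    · rw [if_pos hout, if_pos hout, List.filter_cons]
      by_cases hc : a * mj ≤ (m : Int) ∧ a ∣ (m : Int) - a * mj
      · rw [if_pos (by exact ⟨hout.1, hc.1, hout.2, hc.2⟩), if_pos (by simpa using hc)]
        simp
      · rw [if_neg (by rintro ⟨_, h1, _, h2⟩; exact hc ⟨h1, h2⟩), if_neg (by simpa using hc)]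
        simp
    · rw [if_neg hout, if_neg hout,
        if_neg (by rintro ⟨h1, _, h2, _⟩; exact hout ⟨h1, h2⟩)]
      simp

theorem filter_shrink (a b b' : Int) (p : Int → Bool) (hb : b ≤ b')
    (hfalse : ∀ i, b ≤ i → i < b' → p i = false) :
    (PySem.List.pyRange a b' 1).filter p = (PySem.List.pyRange a b 1).filter p := by
  by_cases hab : a ≤ b
  · have h0 : List.filter p (PySem.List.pyRange b b' 1) = [] :=
      List.filter_eq_nil_iff.mpr (fun x hx => by
        have := PySem.List.mem_pyRange_one.mp hx
        simp [hfalse x this.1 this.2])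
    rw [PySem.List.pyRange_one_append a b b' hab hb, List.filter_append, h0, List.append_nil]
  · rw [PySem.List.pyRange_one_eq_nil (by omega : b ≤ a), List.filter_nil,
      List.filter_eq_nil_iff]
    intro x hx
    have := PySem.List.mem_pyRange_one.mp hx
    simp [hfalse x (by omega) this.2]

-- integer square root (floor), used only to describe where B's while-loop stops
def rtInt (m : Int) : Int := ((Nat.sqrt m.toNat : Nat) : Int)

theorem rt_nonneg (m : Int) : 0 ≤ rtInt m := Int.natCast_nonneg _

theorem le_rt_iff (m d : Int) (hm : 0 ≤ m) (hd : 0 ≤ d) : d ≤ rtInt m ↔ d * d ≤ m := by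
  unfold rtInt
  obtain ⟨a, rfl⟩ := Int.eq_ofNat_of_zero_le hd
  obtain ⟨b, rfl⟩ := Int.eq_ofNat_of_zero_le hm
  rw [Int.toNat_natCast]
  constructor
  · intro h
    have ha : a ≤ Nat.sqrt b := by exact_mod_cast h
    have := Nat.le_sqrt.mp ha
    exact_mod_cast this
  · intro h
    have : a * a ≤ b := by exact_mod_cast h
    exact_mod_cast Nat.le_sqrt.mpr this

theorem scan_spec (m mi mj d : Int) (small large : List Int) (hm : 0 ≤ m) :
    1 ≤ d →
    pairScan m mi mj d small large =
      (small ++ (PySem.List.pyRange d (rtInt m + 1) 1).filter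
          (fun x => PySem.Int.mod m x == 0 &&
            decide (mi ≤ x ∧ mj ≤ PySem.Int.floordiv m x)),
       large ++ ((PySem.List.pyRange d (rtInt m + 1) 1).filter
          (fun x => PySem.Int.mod m x == 0 &&
            decide (PySem.Int.floordiv m x ≠ x ∧ mi ≤ PySem.Int.floordiv m x ∧ mj ≤ x))).map
          (fun x => PySem.Int.floordiv m x)) := by
  fun_induction pairScan m mi mj d small large with
  | case1 d small large h hmod ih =>
    intro hd
    simp only [dite_eq_ite] at ih
    have hdr : d ≤ rtInt m := (le_rt_iff m d hm (by omega)).mpr h.1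
    rw [ih (by omega), PySem.List.pyRange_one_cons (by omega : d < rtInt m + 1),
      List.filter_cons, List.filter_cons]
    simp only [hmod, Bool.true_and, decide_eq_true_eq]
    by_cases h1 : mi ≤ d ∧ mj ≤ PySem.Int.floordiv m d <;>
      by_cases h2 : PySem.Int.floordiv m d ≠ d ∧ mi ≤ PySem.Int.floordiv m d ∧ mj ≤ d <;>
        simp [h1, h2, List.append_assoc]
  | case2 d small large h hmod ih =>
    intro hd
    have hdr : d ≤ rtInt m := (le_rt_iff m d hm (by omega)).mpr h.1
    rw [ih (by omega), PySem.List.pyRange_one_cons (by omega : d < rtInt m + 1),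
      List.filter_cons, List.filter_cons]
    simp only [hmod, Bool.false_and]
    simp
  | case3 d small large h =>
    intro hd
    have hdr : rtInt m < d := by
      by_contra hc
      exact h ⟨(le_rt_iff m d hm (by omega)).mp (by omega), hd⟩
    rw [PySem.List.pyRange_one_eq_nil (by omega)]
    simp

theorem combined_eq (m mi mj : Int) (hm : 0 ≤ m) (hmi : 1 ≤ mi) (hmj : 1 ≤ mj) :
    (pairScan m mi mj 1 [] []).1 ++ (pairScan m mi mj 1 [] []).2.reverse =
      (PySem.List.pyRange mi (m + 1) 1).filter
        (fun x => decide (x * mj ≤ m ∧ x ∣ m - x * mj)) := by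
  have hrtm : rtInt m * rtInt m ≤ m := (le_rt_iff m (rtInt m) hm (rt_nonneg m)).mp le_rfl
  have hrt0 : 0 ≤ rtInt m := rt_nonneg m
  rw [scan_spec m mi mj 1 [] [] hm le_rfl]
  simp only [List.nil_append]
  set S := (PySem.List.pyRange 1 (rtInt m + 1) 1).filter
      (fun x => PySem.Int.mod m x == 0 &&
        decide (mi ≤ x ∧ mj ≤ PySem.Int.floordiv m x)) with hS
  set L := (PySem.List.pyRange 1 (rtInt m + 1) 1).filter
      (fun x => PySem.Int.mod m x == 0 &&
        decide (PySem.Int.floordiv m x ≠ x ∧ mi ≤ PySem.Int.floordiv m x ∧ mj ≤ x)) with hL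
  set F := (PySem.List.pyRange mi (m + 1) 1).filter
      (fun x => decide (x * mj ≤ m ∧ x ∣ m - x * mj)) with hF
  have unpackS : ∀ x : Int, x ∈ S ↔
      (1 ≤ x ∧ x ≤ rtInt m ∧ x ∣ m ∧ mi ≤ x ∧ mj ≤ PySem.Int.floordiv m x) := by
    intro x
    rw [hS]
    simp only [List.mem_filter, PySem.List.mem_pyRange_one, Bool.and_eq_true, beq_iff_eq,
      decide_eq_true_eq, PySem.Int.mod_eq_zero_iff_dvd]
    constructor
    · rintro ⟨⟨a, b⟩, c, d, e⟩; exact ⟨a, by omega, c, d, e⟩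
    · rintro ⟨a, b, c, d, e⟩; exact ⟨⟨a, by omega⟩, c, d, e⟩
  have unpackL : ∀ x : Int, x ∈ L ↔
      (1 ≤ x ∧ x ≤ rtInt m ∧ x ∣ m ∧ PySem.Int.floordiv m x ≠ x ∧
        mi ≤ PySem.Int.floordiv m x ∧ mj ≤ x) := by
    intro x
    rw [hL]
    simp only [List.mem_filter, PySem.List.mem_pyRange_one, Bool.and_eq_true, beq_iff_eq,
      decide_eq_true_eq, PySem.Int.mod_eq_zero_iff_dvd]
    constructor
    · rintro ⟨⟨a, b⟩, c, d, e, f⟩; exact ⟨a, by omega, c, d, e, f⟩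
    · rintro ⟨a, b, c, d, e, f⟩; exact ⟨⟨a, by omega⟩, c, d, e, f⟩
  have hmulq : ∀ x : Int, 0 < x → x ∣ m → x * PySem.Int.floordiv m x = m := fun x hx hd => by
    rw [PySem.Int.floordiv_eq_ediv_of_pos hx, Int.mul_ediv_cancel' hd]
  have hm1 : 1 ≤ rtInt m → 1 ≤ m := fun h => by nlinarith
  have hqpos : ∀ x : Int, 0 < x → x ∣ m → 1 ≤ m → 1 ≤ PySem.Int.floordiv m x := by
    intro x hx hd h1
    have hq := hmulq x hx hd
    by_contra hc
    push_neg at hc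
    nlinarith
  -- strict increase of both sides
  have pairS : S.Pairwise (· < ·) := (PySem.List.pairwise_lt_pyRange_one _ _).filter _
  have pairLlt : L.Pairwise (· < ·) := (PySem.List.pairwise_lt_pyRange_one _ _).filter _
  have pairMap : (L.map (fun x => PySem.Int.floordiv m x)).Pairwise (fun a b => b < a) := by
    rw [List.pairwise_map]
    refine List.Pairwise.imp_of_mem ?_ pairLlt
    intro a b ha hb hab
    obtain ⟨ha1, ha2, haD, _, _, _⟩ := (unpackL a).mp ha
    obtain ⟨hb1, _, hbD, _, _, _⟩ := (unpackL b).mp hb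
    have hm' : 1 ≤ m := hm1 (by omega)
    have h1 := hmulq a (by omega) haD
    have h2 := hmulq b (by omega) hbD
    have hqa := hqpos a (by omega) haD hm'
    have hqb := hqpos b (by omega) hbD hm'
    nlinarith
  have hbig : ∀ y ∈ L.map (fun x => PySem.Int.floordiv m x), rtInt m < y := by
    intro y hy
    obtain ⟨d, hdmem, rfl⟩ := List.mem_map.mp hy
    obtain ⟨h1, h2, h3, h4, _, _⟩ := (unpackL d).mp hdmem
    have hm' : 1 ≤ m := hm1 (by omega)
    have hq := hmulq d (by omega) h3
    have hq1 := hqpos d (by omega) h3 hm'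
    have hdq : d < PySem.Int.floordiv m d := by
      rcases lt_or_ge d (PySem.Int.floordiv m d) with h | h
      · exact h
      · exfalso
        rcases eq_or_lt_of_le h with h' | h'
        · exact h4 h'
        · nlinarith [(le_rt_iff m d hm (by omega)).mp h2]
    by_contra hc
    push_neg at hc
    have : PySem.Int.floordiv m d * PySem.Int.floordiv m d ≤ m :=
      (le_rt_iff m _ hm (by omega)).mp hc
    nlinarith
  have pairwhole : (S ++ (L.map (fun x => PySem.Int.floordiv m x)).reverse).Pairwise (· < ·) := by
    rw [List.pairwise_append]
    refine ⟨pairS, List.pairwise_reverse.mpr pairMap, ?_⟩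
    intro a ha b hb
    obtain ⟨ha1, ha2, _, _, _⟩ := (unpackS a).mp ha
    have := hbig b (List.mem_reverse.mp hb)
    omega
  have pairF : F.Pairwise (· < ·) := (PySem.List.pairwise_lt_pyRange_one _ _).filter _
  -- same members
  have hmem : ∀ x : Int,
      x ∈ S ++ (L.map (fun x => PySem.Int.floordiv m x)).reverse ↔ x ∈ F := by
    intro x
    rw [List.mem_append, List.mem_reverse, hF]
    simp only [List.mem_filter, PySem.List.mem_pyRange_one, decide_eq_true_eq]
    constructor
    · rintro (hx | hx)
      · obtain ⟨h1, h2, h3, h4, h5⟩ := (unpackS x).mp hx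
        have hm' : 1 ≤ m := hm1 (by omega)
        have hq := hmulq x (by omega) h3
        have hxm : x ≤ m := by nlinarith
        refine ⟨⟨h4, by omega⟩, by nlinarith, dvd_sub h3 (dvd_mul_right x mj)⟩
      · obtain ⟨d, hdmem, rfl⟩ := List.mem_map.mp hx
        obtain ⟨h1, h2, h3, h4, h5, h6⟩ := (unpackL d).mp hdmem
        have hm' : 1 ≤ m := hm1 (by omega)
        have hq := hmulq d (by omega) h3
        have hq1 := hqpos d (by omega) h3 hm'
        have hqdvd : PySem.Int.floordiv m d ∣ m :=
          ⟨d, by linarith [hq, mul_comm d (PySem.Int.floordiv m d)]⟩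
        have hqm : PySem.Int.floordiv m d ≤ m := by nlinarith
        refine ⟨⟨h5, by omega⟩, by nlinarith, dvd_sub hqdvd (dvd_mul_right _ mj)⟩
    · rintro ⟨⟨hxmi, hxm⟩, hxle, hxdvd⟩
      have hx1 : 1 ≤ x := by omega
      have hdm : x ∣ m := (dvd_sub_left (dvd_mul_right x mj)).mp hxdvd
      have hm' : 1 ≤ m := by nlinarith
      have hq := hmulq x (by omega) hdm
      have hq1 := hqpos x (by omega) hdm hm'
      have hmjq : mj ≤ PySem.Int.floordiv m x := by nlinarith
      by_cases hxx : x * x ≤ m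
      · exact Or.inl ((unpackS x).mpr
          ⟨hx1, (le_rt_iff m x hm (by omega)).mpr hxx, hdm, hxmi, hmjq⟩)
      · right
        have hqlt : PySem.Int.floordiv m x < x := by nlinarith
        have hqdvd : PySem.Int.floordiv m x ∣ m :=
          ⟨x, by linarith [hq, mul_comm x (PySem.Int.floordiv m x)]⟩
        have hfdq : PySem.Int.floordiv m (PySem.Int.floordiv m x) = x := by
          have h2 := hmulq (PySem.Int.floordiv m x) (by omega) hqdvd
          have hne : PySem.Int.floordiv m x ≠ 0 := by omega
          exact mul_left_cancel₀ hne
            (by linarith [h2, hq, mul_comm (PySem.Int.floordiv m x) x])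
        refine List.mem_map.mpr ⟨PySem.Int.floordiv m x, (unpackL _).mpr
          ⟨hq1, (le_rt_iff m _ hm (by omega)).mpr (by nlinarith), hqdvd,
            by rw [hfdq]; omega, by rw [hfdq]; exact hxmi, hmjq⟩, hfdq⟩
  -- two strictly increasing lists with the same members are equal
  have nodup1 : (S ++ (L.map (fun x => PySem.Int.floordiv m x)).reverse).Nodup :=
    pairwhole.imp (fun h => ne_of_lt h)
  have nodup2 : F.Nodup := pairF.imp (fun h => ne_of_lt h)
  have hperm : (S ++ (L.map (fun x => PySem.Int.floordiv m x)).reverse).Perm F :=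
    List.perm_of_nodup_nodup_toFinset_eq nodup1 nodup2
      (Finset.ext (fun x => by simpa [List.mem_toFinset] using hmem x))
  exact List.Perm.eq_of_pairwise' (pairwhole.imp (fun h => le_of_lt h))
    (pairF.imp (fun h => le_of_lt h)) hperm

theorem sorted_filter_pyRange (a b : Int) (p : Int → Bool) :
    PySem.List.sorted ((PySem.List.pyRange a b 1).filter p) (fun x => x) =
      (PySem.List.pyRange a b 1).filter p := by
  apply PySem.List.sorted_eq_self_of_pairwise
  exact ((PySem.List.pairwise_lt_pyRange_one a b).filter p).imp (fun h => le_of_lt h)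

theorem core_eq (n mi mj : Int) (hmi : 1 ≤ mi) (hmj : 1 ≤ mj) :
    ((PySem.List.pyRange mi (n + 1) 1).foldl (fun r i => sieveInner n i (i * mj) r)
        ((PySem.List.pyRange 0 (n + 1) 1).map (fun _ => ([] : List Int)))) =
      (PySem.List.pyRange 0 (n + 1) 1).map (fun m =>
        (pairScan m mi mj 1 [] []).1 ++ (pairScan m mi mj 1 [] []).2.reverse) := by
  have len0 : ((PySem.List.pyRange 0 (n + 1) 1).map (fun _ => ([] : List Int))).length
      = (n + 1).toNat := by
    rw [List.length_map, PySem.List.length_pyRange_one]; omega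
  apply List.ext_getElem
  · rw [fold_length, len0, List.length_map, PySem.List.length_pyRange_one]; omega
  · intro k h1 h2
    have hk : k < (n + 1).toNat := by rw [fold_length, len0] at h1; exact h1
    have hkn : (k : Int) ≤ n := by omega
    rw [← List.getD_eq_getElem _ [] h1, ← List.getD_eq_getElem _ [] h2,
      fold_getD n mj hmj _ (fun i hi => by
        have := PySem.List.mem_pyRange_one.mp hi; omega) _ k,
      if_pos ⟨by omega, hkn⟩,
      List.getD_eq_getElem _ [] (by omega), List.getElem_map, List.nil_append,
      List.getD_eq_getElem _ [] h2, List.getElem_map, PySem.List.getElem_pyRange_one,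
      zero_add]
    rw [combined_eq (k : Int) mi mj (by omega) hmi hmj]
    rw [filter_shrink mi ((k : Int) + 1) (n + 1) _ (by omega)
      (fun i hi1 hi2 => by
        simp only [decide_eq_false_iff_not]
        rintro ⟨hle, _⟩
        have : i ≤ i * mj := le_mul_of_one_le_right (by omega) hmj
        omega)]

-- ===== VERDICT (by name: the statement is the Claim_ definition above) =====
theorem generate_divisors_under_spec : Claim_equal_generate_divisors_under := by
  intro n include_self include_1 to_sort _
  unfold Spec_generate_divisors_under generate_divisors_under generate_divisors_under_alt
  dsimp only
  have hmi : (1 : Int) ≤ if include_1 then 1 else 2 := by split <;> norm_num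
  have hmj : (1 : Int) ≤ if include_self then 1 else 2 := by split <;> norm_num
  rw [core_eq n _ _ hmi hmj]
  cases to_sort with
  | false => rfl
  | true =>
    rw [if_pos rfl, List.map_map]
    apply List.map_congr_left
    intro m hm
    have hm0 : 0 ≤ m := (PySem.List.mem_pyRange_one.mp hm).1
    simp only [Function.comp_apply]
    rw [combined_eq m _ _ hm0 hmi hmj, sorted_filter_pyRange]
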